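-- pv_equiv track=rewrite | github.com/crasherbe/lottery-generator | generator.py | valid_pattern
-- ===== SOURCE A (Python) =====
-- def valid_pattern(num):
--
--     even = sum(int(x) % 2 == 0 for x in num)
--     odd = len(num) - even
--
--     small = sum(int(x) <= 4 for x in num)
--     big = len(num) - small
--
--     if even >= 1 and odd >= 1 and small >= 1 and big >= 1:
--         return True
--
--     return False
-- ===== SOURCE B (Python) =====
-- def valid_pattern(num):
--     has_even = has_odd = has_small = has_big = False
--     for x in num:
--         v = int(x)
--         if v % 2 == 0:
--             has_even = True
--         else:
--             has_odd = True
--         if v <= 4: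
--             has_small = True
--         else:
--             has_big = True
--         if has_even and has_odd and has_small and has_big:
--             return True
--     return False
-- ===== Notes on version B (the rewrite author's own statement) =====
-- stated objective: simpler
-- what changed: Replaces the two counting passes plus length subtractions with one loop maintaining four presence booleans and returning early once all four categories are witnessed.
import Mathlib
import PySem

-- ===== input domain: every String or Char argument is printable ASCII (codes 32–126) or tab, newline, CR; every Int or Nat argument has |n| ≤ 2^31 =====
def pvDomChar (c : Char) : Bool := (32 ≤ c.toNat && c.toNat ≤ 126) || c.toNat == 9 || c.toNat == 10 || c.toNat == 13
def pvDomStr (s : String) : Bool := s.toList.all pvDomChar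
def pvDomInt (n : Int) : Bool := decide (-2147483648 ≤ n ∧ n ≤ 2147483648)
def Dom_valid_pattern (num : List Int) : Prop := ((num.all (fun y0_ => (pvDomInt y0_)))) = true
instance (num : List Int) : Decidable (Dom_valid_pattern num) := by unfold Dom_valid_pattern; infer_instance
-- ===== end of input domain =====

-- B replaces A's two counting passes (and length subtractions) by one loop over four
-- presence booleans with early exit; objective: simpler.

-- ===== PORT A =====
def valid_pattern (num : List Int) : Bool :=
  let even : Int := num.foldl (fun acc x => acc + (if PySem.Int.mod x 2 == 0 then 1 else 0)) 0
  let odd : Int := (num.length : Int) - even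
  let small : Int := num.foldl (fun acc x => acc + (if x ≤ 4 then 1 else 0)) 0
  let big : Int := (num.length : Int) - small
  if even ≥ 1 ∧ odd ≥ 1 ∧ small ≥ 1 ∧ big ≥ 1 then true else false

-- ===== PORT B =====
-- the for-loop of Source B: four presence flags, early return once all are set
def vpLoop (num : List Int) (he ho hs hb : Bool) : Bool :=
  match num with
  | [] => false
  | x :: rest =>
    let he := if PySem.Int.mod x 2 == 0 then true else he
    let ho := if PySem.Int.mod x 2 == 0 then ho else true
    let hs := if x ≤ 4 then true else hs
    let hb := if x ≤ 4 then hb else true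
    if he && ho && hs && hb then true else vpLoop rest he ho hs hb

def valid_pattern_alt (num : List Int) : Bool :=
  vpLoop num false false false false

-- ===== PRECONDITION & SPEC =====
def Spec_valid_pattern (num : List Int) (out : Bool) : Prop := out = valid_pattern_alt num
instance (num : List Int) (out : Bool) : Decidable (Spec_valid_pattern num out) := by unfold Spec_valid_pattern; infer_instance

-- ===== CLAIM (what is proved, stated in full; the proofs are below) =====
def Claim_equal_valid_pattern : Prop := ∀ (num : List Int), Dom_valid_pattern num → Spec_valid_pattern num (valid_pattern num)

-- ===== LEMMAS AND PROOFS =====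

-- A's counting fold equals countP
theorem vp_cnt_eq (p : Int → Bool) :
    ∀ (num : List Int) (a : Int),
      num.foldl (fun acc x => acc + (if p x then (1 : Int) else 0)) a
        = a + (num.countP p : Int) := by
  intro num
  induction num with
  | nil => intro a; simp
  | cons x rest ih =>
    intro a
    simp only [List.foldl_cons, List.countP_cons, ih]
    by_cases h : p x <;> simp [h, add_comm, add_left_comm]

theorem vp_cnt_pos (p : Int → Bool) (num : List Int) :
    (1 ≤ num.foldl (fun acc x => acc + (if p x then (1 : Int) else 0)) 0) ↔ num.any p = true := by
  rw [vp_cnt_eq, zero_add, List.any_eq_true, ← List.countP_pos_iff]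
  omega

-- length minus count ≥ 1 iff some element fails p
theorem vp_rest_pos (p : Int → Bool) (num : List Int) :
    (1 ≤ (num.length : Int) - num.foldl (fun acc x => acc + (if p x then (1 : Int) else 0)) 0)
      ↔ num.any (fun x => ! p x) = true := by
  rw [vp_cnt_eq, zero_add, List.any_eq_true, ← List.countP_pos_iff]
  have h := List.length_eq_countP_add_countP (l := num) (p := p)
  have h2 : num.countP (fun a => decide ¬(p a = true)) = num.countP (fun x => ! p x) :=
    List.countP_congr (by intro a _; simp)
  omega

-- invariant of B's loop: while not all flags are set it computes the presence disjunctions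
theorem vpLoop_eq : ∀ (num : List Int) (he ho hs hb : Bool),
    (he && ho && hs && hb) = false →
    vpLoop num he ho hs hb
      = ((he || num.any (fun x => PySem.Int.mod x 2 == 0))
        && (ho || num.any (fun x => !(PySem.Int.mod x 2 == 0)))
        && (hs || num.any (fun x => decide (x ≤ 4)))
        && (hb || num.any (fun x => !(decide (x ≤ 4))))) := by
  intro num
  induction num with
  | nil => intro he ho hs hb h; simp only [vpLoop, List.any_nil, Bool.or_false]; exact h.symm
  | cons x rest ih =>
    intro he ho hs hb h
    simp only [vpLoop, List.any_cons]
    by_cases hx4 : x ≤ 4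
    all_goals cases hpe : (PySem.Int.mod x 2 == 0)
    all_goals first
      | simp only [if_pos hx4, decide_eq_true hx4]
      | simp only [if_neg hx4, decide_eq_false hx4]
    all_goals (cases he <;> cases ho <;> cases hs <;> cases hb <;>
      first
        | exact absurd h (by decide)
        | simp [ih, hx4])

-- ===== VERDICT (by name: the statement is the Claim_ definition above) =====
theorem valid_pattern_spec : Claim_equal_valid_pattern := by
  intro num _
  have hE := vp_cnt_pos (fun x => PySem.Int.mod x 2 == 0) num
  have hO := vp_rest_pos (fun x => PySem.Int.mod x 2 == 0) num
  have hS := vp_cnt_pos (fun x => decide (x ≤ 4)) num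
  have hB := vp_rest_pos (fun x => decide (x ≤ 4)) num
  simp only [decide_eq_true_eq] at hS hB
  show valid_pattern num = valid_pattern_alt num
  simp only [valid_pattern, valid_pattern_alt]
  rw [vpLoop_eq num false false false false rfl]
  simp only [Bool.false_or]
  split_ifs with hc
  · obtain ⟨c1, c2, c3, c4⟩ := hc
    rw [hE.mp c1, hO.mp c2, hS.mp c3, hB.mp c4]
    decide
  · cases hA1 : (num.any fun x => PySem.Int.mod x 2 == 0) <;>
    cases hA2 : (num.any fun x => !(PySem.Int.mod x 2 == 0)) <;>
    cases hA3 : (num.any fun x => decide (x ≤ 4)) <;>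
    cases hA4 : (num.any fun x => !(decide (x ≤ 4))) <;>
      first
        | rfl
        | exact absurd ⟨hE.mpr hA1, hO.mpr hA2, hS.mpr hA3, hB.mpr hA4⟩ hc
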